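-- pv_equiv track=rewrite | github.com/Vavay10/autech | backend/expre.py | potenciar_lenguaje
-- ===== SOURCE A (Python) =====
-- def concatenar_lenguajes(lenguaje1, lenguaje2):
--     # Asegurarse que son listas de strings
--     l1 = [str(s) for s in lenguaje1]
--     l2 = [str(s) for s in lenguaje2]
--     return [x + y for x in l1 for y in l2]
--
-- def potenciar_lenguaje(lenguaje, potencia):
--     if potencia == 0:
--         return ['']  # L^0 es {epsilon}
--     if potencia < 0:
--         raise ValueError("La potencia no puede ser negativa")
--     if potencia == 1:
--         return lenguaje[:]  # Devolver copia
--
--     resultado = lenguaje[:]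
--     base = lenguaje[:]
--     for _ in range(potencia - 1):
--         resultado = concatenar_lenguajes(resultado, base)
--     return resultado
-- ===== SOURCE B (Python) =====
-- def potenciar_lenguaje(lenguaje, potencia):
--     if potencia == 0:
--         return ['']  # L^0 es {epsilon}
--     if potencia < 0:
--         raise ValueError("La potencia no puede ser negativa")
--     if potencia == 1:
--         return lenguaje[:]  # copia, elementos originales sin str()
--     l1 = [str(s) for s in lenguaje]
--
--     def power(n):
--         # right-nested n-fold product of l1, first factor slowest
--         if n == 0:
--             return ['']
--         sub = power(n - 1)
--         return [x + t for x in l1 for t in sub]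
--
--     return power(potencia)
-- ===== Notes on version B (the rewrite author's own statement) =====
-- stated objective: alternative
-- what changed: Replaces A's iterative left-folded concatenation of p-1 intermediate languages with a single right-nested recursion computing the p-fold product directly (stringifying the language once instead of on every iteration).
import Mathlib
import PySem

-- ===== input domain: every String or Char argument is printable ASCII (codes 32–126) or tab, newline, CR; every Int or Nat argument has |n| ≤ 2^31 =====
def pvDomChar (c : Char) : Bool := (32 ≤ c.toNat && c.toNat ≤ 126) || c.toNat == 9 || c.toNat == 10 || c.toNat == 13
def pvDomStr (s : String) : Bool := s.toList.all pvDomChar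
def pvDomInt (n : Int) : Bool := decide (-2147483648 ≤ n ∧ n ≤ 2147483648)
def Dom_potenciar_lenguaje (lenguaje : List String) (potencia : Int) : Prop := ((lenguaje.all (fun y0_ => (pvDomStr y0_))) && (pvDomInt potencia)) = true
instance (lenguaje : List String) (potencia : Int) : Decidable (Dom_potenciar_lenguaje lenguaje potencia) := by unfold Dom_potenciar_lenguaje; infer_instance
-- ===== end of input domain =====

-- B replaces A's iterative left-folded concatenation with a single right-nested
-- recursive product (objective: alternative decomposition, same cost).

-- ===== PORT A =====
-- str(s) on a string is the identity, so the str() stringification is `fun s => s`.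
def concatenar_lenguajes (lenguaje1 lenguaje2 : List String) : List String :=
  let l1 := lenguaje1.map (fun s => s)
  let l2 := lenguaje2.map (fun s => s)
  l1.flatMap (fun x => l2.map (fun y => x ++ y))

def potenciar_lenguaje (lenguaje : List String) (potencia : Int) : List String :=
  if potencia = 0 then [""]
  else if potencia < 0 then []   -- Python raises ValueError here; excluded by Pre_
  else if potencia = 1 then lenguaje
  else
    (List.range (potencia - 1).toNat).foldl
      (fun resultado _ => concatenar_lenguajes resultado lenguaje) lenguaje

-- ===== PORT B =====
-- Source B's inner recursive helper `power`
def pyPowerB (l1 : List String) : Nat → List String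
  | 0 => [""]
  | n+1 =>
    let sub := pyPowerB l1 n
    l1.flatMap (fun x => sub.map (fun t => x ++ t))

def potenciar_lenguaje_alt (lenguaje : List String) (potencia : Int) : List String :=
  if potencia = 0 then [""]
  else if potencia < 0 then []   -- Python raises ValueError here; excluded by Pre_
  else if potencia = 1 then lenguaje
  else pyPowerB (lenguaje.map (fun s => s)) potencia.toNat

-- ===== PRECONDITION & SPEC =====
-- Pre_ excludes exactly potencia < 0, where A raises ValueError.
def Pre_potenciar_lenguaje (lenguaje : List String) (potencia : Int) : Prop := 0 ≤ potencia
instance (lenguaje : List String) (potencia : Int) : Decidable (Pre_potenciar_lenguaje lenguaje potencia) := by unfold Pre_potenciar_lenguaje; infer_instance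
def pvWitness_potenciar_lenguaje : List String × Int := (["a", "b"], 2)

def Spec_potenciar_lenguaje (lenguaje : List String) (potencia : Int) (out : List String) : Prop := out = potenciar_lenguaje_alt lenguaje potencia
instance (lenguaje : List String) (potencia : Int) (out : List String) : Decidable (Spec_potenciar_lenguaje lenguaje potencia out) := by unfold Spec_potenciar_lenguaje; infer_instance

-- ===== CLAIM (what is proved, stated in full; the proofs are below) =====
def Claim_equal_potenciar_lenguaje : Prop := ∀ (lenguaje : List String) (potencia : Int), Dom_potenciar_lenguaje lenguaje potencia → Pre_potenciar_lenguaje lenguaje potencia → Spec_potenciar_lenguaje lenguaje potencia (potenciar_lenguaje lenguaje potencia)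

-- ===== LEMMAS AND PROOFS =====

-- appending one more factor of `l` on the right advances the power by one
lemma pyPowerB_snoc (l : List String) (k : Nat) :
    (pyPowerB l k).flatMap (fun t => l.map (fun y => t ++ y)) = pyPowerB l (k+1) := by
  induction k with
  | zero => simp [pyPowerB]
  | succ k ih =>
    conv_lhs => rw [pyPowerB]
    simp only [List.flatMap_assoc, List.flatMap_map, Function.comp_def, String.append_assoc]
    rw [pyPowerB]
    simp only [← ih]
    simp [List.map_flatMap, List.map_map, Function.comp_def]

-- A's loop, run k times from seed `r`, computes r · l^k (leftmost factor slowest)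
lemma foldl_concat (base : List String) (k : Nat) (l : List String) :
    (List.range k).foldl (fun r _ => r.flatMap (fun x => base.map (fun y => x ++ y))) l
      = l.flatMap (fun x => (pyPowerB base k).map (fun t => x ++ t)) := by
  induction k with
  | zero => simp [pyPowerB]
  | succ k ih =>
    rw [List.range_succ, List.foldl_append, ih]
    simp only [List.foldl_cons, List.foldl_nil, List.flatMap_assoc, List.flatMap_map,
      Function.comp_def, String.append_assoc]
    rw [← pyPowerB_snoc]
    simp [List.map_flatMap, List.map_map, Function.comp_def]

-- ===== VERDICT (by name: the statement is the Claim_ definition above) =====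
theorem potenciar_lenguaje_spec : Claim_equal_potenciar_lenguaje := by
  intro l p _ hpre
  unfold Spec_potenciar_lenguaje potenciar_lenguaje potenciar_lenguaje_alt
  split_ifs with h0 hneg h1
  · rfl
  · rfl
  · rfl
  · -- p ≥ 2
    have hp2 : 2 ≤ p := by omega
    simp only [concatenar_lenguajes, List.map_id']
    rw [foldl_concat]
    have hk : (p - 1).toNat = p.toNat - 1 := by omega
    have hk2 : p.toNat - 1 + 1 = p.toNat := by omega
    rw [hk]
    conv_rhs => rw [← hk2, pyPowerB]
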